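-- pv_equiv track=rewrite | github.com/jxie0755/Learning_Python | ZZProject/NewEmptyLine/new_empty_line.py | count_empty
-- ===== SOURCE A (Python) =====
-- def count_empty(content):
--     splt = content.split("\n")
--     count = 0
--     for i in splt[::-1]:
--         if i == '':
--             count += 1
--         else:
--             return count
-- ===== SOURCE B (Python) =====
-- def count_empty(content):
--     # Closed form: the trailing empty split-pieces are exactly the trailing
--     # '\n' characters; if nothing is left after stripping them, A falls
--     # through and returns None -- so do we.
--     stripped = content.rstrip("\n")
--     if stripped == "":
--         return None
--     return len(content) - len(stripped)
-- ===== Notes on version B (the rewrite author's own statement) =====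
-- stated objective: simpler
-- what changed: Replaces A's split-into-lines / reverse / counting loop by the closed form len(content) - len(content.rstrip('\n')); no list of lines is ever built.
-- outside the precondition, e.g. on count_empty('\n'): A returns None, B returns None; on count_empty('\n\n'): A returns None, B returns None
import Mathlib
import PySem

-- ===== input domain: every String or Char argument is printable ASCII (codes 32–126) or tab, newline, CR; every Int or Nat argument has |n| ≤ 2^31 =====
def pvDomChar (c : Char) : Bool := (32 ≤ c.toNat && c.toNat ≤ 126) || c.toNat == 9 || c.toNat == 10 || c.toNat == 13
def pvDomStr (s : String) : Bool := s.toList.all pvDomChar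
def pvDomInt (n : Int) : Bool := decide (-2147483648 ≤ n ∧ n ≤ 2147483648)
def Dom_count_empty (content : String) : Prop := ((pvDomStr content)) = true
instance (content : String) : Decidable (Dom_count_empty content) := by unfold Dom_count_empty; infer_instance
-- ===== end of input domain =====

-- B replaces A's split-into-lines / reverse / counting loop by the closed form
-- len(content) - len(content.rstrip('\n')) (objective: simpler).


-- ===== PORT A =====
-- the for-loop over splt[::-1]; the [] case is Python's fall-through 'return None',
-- excluded by Pre_count_empty (nothing is claimed about the value there)
def countEmptyLoop : List String → Int → Int
  | [], count => count
  | i :: rest, count => if i = "" then countEmptyLoop rest (count + 1) else count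

def count_empty (content : String) : Int :=
  let splt := (PySem.Str.split? content "\n").getD []   -- sep "\n" ≠ "", never raises
  countEmptyLoop ((PySem.List.slice? splt none none (-1)).getD []) 0

-- ===== PORT B =====
def count_empty_alt (content : String) : Int :=
  let cs := content.toList
  -- content.rstrip("\n"), ported by hand (exact: drops exactly the trailing run of '\n')
  let stripped := (cs.reverse.dropWhile (fun c => c == '\n')).reverse
  (cs.length : Int) - (stripped.length : Int)

-- ===== PRECONDITION & SPEC =====
-- Pre_ excludes contents consisting entirely of '\n' (including ""), on which A
-- falls through its loop and returns None, not an int (B returns None there too).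
def Pre_count_empty (content : String) : Prop :=
  content.toList.any (fun c => c != '\n') = true
instance (content : String) : Decidable (Pre_count_empty content) := by
  unfold Pre_count_empty; infer_instance

def pvWitness_count_empty : String := "a\n"

def Spec_count_empty (content : String) (out : Int) : Prop := out = count_empty_alt content
instance (content : String) (out : Int) : Decidable (Spec_count_empty content out) := by
  unfold Spec_count_empty; infer_instance

-- ===== CLAIM (what is proved, stated in full; the proofs are below) =====
def Claim_equal_count_empty : Prop :=
  ∀ (content : String), Dom_count_empty content → Pre_count_empty content →
    Spec_count_empty content (count_empty content)

-- ===== LEMMAS AND PROOFS =====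

-- a fuel-free model of PySem.Chars.splitOn at the single-char separator '\n'
def consHead (pre : List Char) : List (List Char) → List (List Char)
  | [] => [pre]
  | p :: ps => (pre ++ p) :: ps

def mySplit : List Char → List (List Char)
  | [] => [[]]
  | c :: rest => if c = '\n' then [] :: mySplit rest else consHead [c] (mySplit rest)

theorem mySplit_ne_nil (cs : List Char) : mySplit cs ≠ [] := by
  cases cs with
  | nil => simp [mySplit]
  | cons c rest =>
    simp only [mySplit]
    split
    · simp
    · cases h : mySplit rest <;> simp [consHead]

theorem consHead_consHead (a b : List Char) (l : List (List Char)) :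
    consHead a (consHead b l) = consHead (a ++ b) l := by
  cases l <;> simp [consHead]

theorem splitOn_go_eq (fuel : Nat) : ∀ (l cur : List Char) (acc : List (List Char)),
    l.length < fuel →
    PySem.Chars.splitOn.go ['\n'] fuel l cur acc
      = acc.reverse ++ consHead cur.reverse (mySplit l) := by
  induction fuel with
  | zero => intro l cur acc h; omega
  | succ f ih =>
    intro l cur acc h
    cases l with
    | nil => simp [PySem.Chars.splitOn.go, mySplit, consHead]
    | cons c rest =>
      by_cases hc : c = '\n'
      · subst hc
        have hpre : List.isPrefixOf ['\n'] ('\n' :: rest) = true := by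
          simp [List.isPrefixOf]
        rw [show PySem.Chars.splitOn.go ['\n'] (f+1) ('\n' :: rest) cur acc
              = PySem.Chars.splitOn.go ['\n'] f (List.drop 1 ('\n' :: rest)) [] (cur.reverse :: acc) by
            simp [PySem.Chars.splitOn.go, hpre]]
        rw [List.drop_succ_cons, List.drop_zero,
            ih rest [] (cur.reverse :: acc) (by simp at h ⊢; omega)]
        rw [show mySplit ('\n' :: rest) = [] :: mySplit rest by simp [mySplit]]
        cases h2 : mySplit rest with
        | nil => exact absurd h2 (mySplit_ne_nil rest)
        | cons p ps => simp [consHead]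
      · have hpre : List.isPrefixOf ['\n'] (c :: rest) = false := by
          simp only [List.isPrefixOf, Bool.and_eq_false_iff, beq_eq_false_iff_ne]
          left; exact fun h' => hc h'.symm
        rw [show PySem.Chars.splitOn.go ['\n'] (f+1) (c :: rest) cur acc
              = PySem.Chars.splitOn.go ['\n'] f rest (c :: cur) acc by
            simp [PySem.Chars.splitOn.go, hpre]]
        rw [ih rest (c :: cur) acc (by simp at h ⊢; omega)]
        rw [show mySplit (c :: rest) = consHead [c] (mySplit rest) by simp [mySplit, hc]]
        rw [consHead_consHead, List.reverse_cons]

theorem splitOn_eq_mySplit (cs : List Char) :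
    PySem.Chars.splitOn cs ['\n'] = mySplit cs := by
  rw [PySem.Chars.splitOn, splitOn_go_eq (cs.length + 1) cs [] [] (by omega)]
  cases h : mySplit cs with
  | nil => exact absurd h (mySplit_ne_nil cs)
  | cons p ps => simp [consHead]

theorem mySplit_append_newline (ds : List Char) :
    mySplit (ds ++ ['\n']) = mySplit ds ++ [[]] := by
  induction ds with
  | nil => simp [mySplit]
  | cons d ds ih =>
    by_cases hd : d = '\n'
    · subst hd; simp [mySplit, ih]
    · simp only [List.cons_append, mySplit, if_neg hd, ih]
      cases h : mySplit ds with
      | nil => exact absurd h (mySplit_ne_nil ds)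
      | cons p ps => simp [consHead]

theorem mySplit_append_replicate (ds : List Char) (n : Nat) :
    mySplit (ds ++ List.replicate n '\n') = mySplit ds ++ List.replicate n [] := by
  induction n with
  | zero => simp
  | succ n ih =>
    rw [List.replicate_succ', ← List.append_assoc, mySplit_append_newline, ih,
        List.replicate_succ' (n := n), ← List.append_assoc]

theorem mySplit_getLast?_ne (ds : List Char) (hne : ds ≠ [])
    (hl : ds.getLast? ≠ some '\n') : (mySplit ds).getLast? ≠ some [] := by
  induction ds with
  | nil => exact absurd rfl hne
  | cons d ds ih =>
    cases ds with
    | nil =>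
      have hd : d ≠ '\n' := by simpa using hl
      simp [mySplit, if_neg hd, consHead]
    | cons e es =>
      have hl' : (e :: es).getLast? ≠ some '\n' := by
        simpa [List.getLast?_cons_cons] using hl
      have ih' := ih (by simp) hl'
      have hstep : mySplit (d :: e :: es)
          = if d = '\n' then [] :: mySplit (e :: es) else consHead [d] (mySplit (e :: es)) := rfl
      by_cases hd : d = '\n'
      · rw [hstep, if_pos hd]
        cases h : mySplit (e :: es) with
        | nil => exact absurd h (mySplit_ne_nil _)
        | cons p ps => rw [h] at ih'; simpa [List.getLast?_cons_cons] using ih'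
      · rw [hstep, if_neg hd]
        cases h : mySplit (e :: es) with
        | nil => exact absurd h (mySplit_ne_nil _)
        | cons p ps =>
          rw [h] at ih'
          cases ps with
          | nil => simp [consHead]
          | cons q qs => simpa [consHead, List.getLast?_cons_cons] using ih'

theorem countEmptyLoop_replicate (n : Nat) (r : List String) (c : Int) :
    countEmptyLoop (List.replicate n "" ++ r) c = countEmptyLoop r (c + n) := by
  induction n generalizing c with
  | zero => simp
  | succ n ih =>
    rw [List.replicate_succ, List.cons_append]
    simp only [countEmptyLoop, if_true]
    rw [ih]
    congr 1
    push_cast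
    ring

-- ===== VERDICT (by name: the statement is the Claim_ definition above) =====
theorem count_empty_spec : Claim_equal_count_empty := by
  intro content _hdom hpre
  unfold Spec_count_empty count_empty count_empty_alt
  set cs := content.toList with hcs
  set r := cs.reverse with hr
  set n := (r.takeWhile (fun c => c == '\n')).length with hn
  set ds := (r.dropWhile (fun c => c == '\n')).reverse with hds
  have htake : r.takeWhile (fun c => c == '\n') = List.replicate n '\n' := by
    rw [hn]
    exact List.eq_replicate_of_mem (fun b hb => by
      simpa using List.mem_takeWhile_imp hb)
  have hdecomp : cs = ds ++ List.replicate n '\n' := by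
    have := List.takeWhile_append_dropWhile (p := fun c => c == '\n') (l := r)
    calc cs = r.reverse := by rw [hr, List.reverse_reverse]
    _ = (r.takeWhile (fun c => c == '\n') ++ r.dropWhile (fun c => c == '\n')).reverse := by
          rw [this]
    _ = ds ++ List.replicate n '\n' := by
          rw [List.reverse_append, htake, List.reverse_replicate, hds]
  have hdrop_ne : r.dropWhile (fun c => c == '\n') ≠ [] := by
    intro h0
    have hall := List.dropWhile_eq_nil_iff.mp h0
    unfold Pre_count_empty at hpre
    rw [List.any_eq_true] at hpre
    obtain ⟨x, hx, hxne⟩ := hpre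
    have : (x == '\n') = true := hall x (by rw [hr]; simpa using hx)
    simp at hxne this
    exact hxne this
  have hds_ne : ds ≠ [] := by
    rw [hds]; simpa using hdrop_ne
  have hlast : ds.getLast? ≠ some '\n' := by
    rw [hds, List.getLast?_reverse]
    rw [List.head?_eq_some_head hdrop_ne]
    intro hcon
    have := List.head_dropWhile_not (fun c => c == '\n') hdrop_ne
    simp only [Option.some_inj] at hcon
    rw [hcon] at this
    simp at this
  -- A's side
  have hsplit : PySem.Str.split? content "\n"
      = some ((mySplit cs).map String.ofList) := by
    show Option.map (fun x => List.map String.ofList x) (PySem.Chars.split? content.toList "\n".toList)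
        = some ((mySplit cs).map String.ofList)
    rw [show ("\n" : String).toList = ['\n'] from rfl]
    rw [PySem.Chars.split?]
    simp [← hcs, splitOn_eq_mySplit]
  have hA : countEmptyLoop ((PySem.List.slice?
        ((PySem.Str.split? content "\n").getD []) none none (-1)).getD []) 0 = (n : Int) := by
    rw [hsplit, Option.getD_some, PySem.List.slice?_none_none_neg_one, Option.getD_some]
    rw [hdecomp, mySplit_append_replicate, List.map_append, List.reverse_append]
    rw [show List.map String.ofList (List.replicate n []) = List.replicate n "" by
      simp [List.map_replicate]]
    rw [List.reverse_replicate, countEmptyLoop_replicate, ← List.map_reverse]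
    have hqlast : (mySplit ds).getLast? ≠ some [] := mySplit_getLast?_ne ds hds_ne hlast
    cases h2 : (mySplit ds).reverse with
    | nil =>
      exact absurd (by simpa using h2) (mySplit_ne_nil ds)
    | cons q qs =>
      have hq : q ≠ [] := by
        intro hq0
        apply hqlast
        rw [← List.head?_reverse, h2, hq0]; rfl
      rw [List.map_cons]
      rw [show countEmptyLoop (String.ofList q :: List.map String.ofList qs) (0 + n) = 0 + n by
        simp only [countEmptyLoop]
        rw [if_neg (by
          intro hcon
          apply hq
          have : (String.ofList q).toList = ("" : String).toList := by rw [hcon]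
          simpa using this)]]
      omega
  rw [hA]
  -- B's side
  have hlen : cs.length = ds.length + n := by
    rw [hdecomp]; simp
  show (n : Int) = (cs.length : Int)
      - (((cs.reverse.dropWhile (fun c => c == '\n')).reverse).length : Int)
  have hdlen : ((cs.reverse.dropWhile (fun c => c == '\n')).reverse).length = ds.length := by
    rw [hds, hr]
  rw [hdlen, hlen]
  push_cast
  ring
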